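-- pv_equiv track=rewrite | github.com/gotofritz/quick_and_dirty | anki-python/anki-deu.py | last_vowel_to_umlauts
-- ===== SOURCE A (Python) =====
-- def last_vowel_to_umlauts(str):
--     replacements = { 'a': 'ä', 'o': 'ö', 'u': 'ü', 'A': 'Ä', 'O': 'Ö', 'U': 'Ü'}
--     vowels = dict.keys(replacements)
--     str_len = len(str)
--     for idx, item in enumerate(str[::-1], 1):
--         if item in vowels:
--             return str[:(str_len - idx)] + replacements[item] + str[str_len - idx + 1:]
--     raise ValueError('no vowels found {}'.format(str))
-- ===== SOURCE B (Python) =====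
-- def last_vowel_to_umlauts(str):
--     replacements = {'a': 'ä', 'o': 'ö', 'u': 'ü', 'A': 'Ä', 'O': 'Ö', 'U': 'Ü'}
--     positions = [i for i, c in enumerate(str) if c in replacements]
--     if not positions:
--         raise ValueError('no vowels found {}'.format(str))
--     i = positions[-1]
--     return str[:i] + replacements[str[i]] + str[i + 1:]
-- ===== Notes on version B (the rewrite author's own statement) =====
-- stated objective: idiomatic
-- what changed: Replaces A's reversed-string early-exit walk (enumerate over str[::-1] with 1-based index arithmetic) by a forward build-then-select: collect all vowel indices in one comprehension and splice at the last one.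
import Mathlib
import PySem

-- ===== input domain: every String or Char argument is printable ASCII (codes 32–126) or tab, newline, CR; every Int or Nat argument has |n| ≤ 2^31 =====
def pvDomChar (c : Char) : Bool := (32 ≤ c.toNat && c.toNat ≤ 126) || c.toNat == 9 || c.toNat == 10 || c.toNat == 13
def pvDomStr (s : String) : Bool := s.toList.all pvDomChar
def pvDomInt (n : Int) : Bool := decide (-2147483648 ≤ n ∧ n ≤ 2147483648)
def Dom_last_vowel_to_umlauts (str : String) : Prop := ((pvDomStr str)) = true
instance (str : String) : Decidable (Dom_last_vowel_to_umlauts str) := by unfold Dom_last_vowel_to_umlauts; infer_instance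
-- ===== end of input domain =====

-- B replaces A's reversed-string early-exit walk by a forward collect-all-vowel-indices
-- comprehension and a splice at the last collected index (idiomatic build-then-select).


-- ===== PORT A =====
-- the 'replacements' dict as a lookup function; membership 'item in vowels' = isSome
def pvRepl (c : Char) : Option String :=
  if c = 'a' then some "ä" else if c = 'o' then some "ö" else if c = 'u' then some "ü"
  else if c = 'A' then some "Ä" else if c = 'O' then some "Ö" else if c = 'U' then some "Ü"
  else none

-- the for-loop over enumerate(str[::-1], 1); early return = some, falling through = none (raise).
-- Slice indices str_len-idx and str_len-idx+1 are in [0, len], where Python slicing = take/drop.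
def lvuLoopA (s : List Char) (strLen : Nat) (idx : Nat) : List Char → Option String
  | [] => none
  | item :: rest =>
    match pvRepl item with
    | some r => some (String.mk (s.take (strLen - idx)) ++ r ++ String.mk (s.drop (strLen - idx + 1)))
    | none => lvuLoopA s strLen (idx + 1) rest

def last_vowel_to_umlauts (str : String) : String :=
  (lvuLoopA str.toList str.toList.length 1 str.toList.reverse).getD ""   -- none = ValueError, excluded by Pre_

-- ===== PORT B =====
-- the comprehension [i for i, c in enumerate(str) if c in replacements]
def lvuPositions (i : Nat) : List Char → List Nat
  | [] => []
  | c :: rest => if (pvRepl c).isSome then i :: lvuPositions (i + 1) rest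
                 else lvuPositions (i + 1) rest

def last_vowel_to_umlauts_alt (str : String) : String :=
  match (lvuPositions 0 str.toList).getLast? with
  | none => ""   -- ValueError, excluded by Pre_
  | some j =>
      String.mk (str.toList.take j) ++ ((str.toList[j]?.bind pvRepl).getD "") ++
        String.mk (str.toList.drop (j + 1))

-- ===== PRECONDITION & SPEC =====
-- Pre_ excludes exactly the strings with no vowel from {a,o,u,A,O,U}, on which A raises ValueError.
def Pre_last_vowel_to_umlauts (str : String) : Prop :=
  (str.toList.any (fun c => c ∈ ['a', 'o', 'u', 'A', 'O', 'U'])) = true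
instance (str : String) : Decidable (Pre_last_vowel_to_umlauts str) := by
  unfold Pre_last_vowel_to_umlauts; infer_instance
def pvWitness_last_vowel_to_umlauts : String := "haus"

def Spec_last_vowel_to_umlauts (str : String) (out : String) : Prop := out = last_vowel_to_umlauts_alt str
instance (str : String) (out : String) : Decidable (Spec_last_vowel_to_umlauts str out) := by unfold Spec_last_vowel_to_umlauts; infer_instance

-- ===== CLAIM (what is proved, stated in full; the proofs are below) =====
def Claim_equal_last_vowel_to_umlauts : Prop := ∀ (str : String), Dom_last_vowel_to_umlauts str → Pre_last_vowel_to_umlauts str → Spec_last_vowel_to_umlauts str (last_vowel_to_umlauts str)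

-- ===== LEMMAS AND PROOFS =====

-- the vowel predicate both loops test
def lvuP (c : Char) : Bool := (pvRepl c).isSome

-- A's loop finds the first vowel of its (reversed) argument and splices with the running index.
theorem lvuLoopA_eq (s : List Char) (strLen : Nat) :
    ∀ (t : List Char) (idx : Nat),
      lvuLoopA s strLen idx t =
        (t.findIdx? lvuP).bind (fun k =>
          (t[k]?).map (fun c =>
            String.mk (s.take (strLen - (idx + k))) ++ (pvRepl c).getD "" ++
              String.mk (s.drop (strLen - (idx + k) + 1)))) := by
  intro t
  induction t with
  | nil => intro idx; simp [lvuLoopA]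
  | cons c rest ih =>
    intro idx
    by_cases h : lvuP c
    · rcases Option.isSome_iff_exists.mp h with ⟨r, hr⟩
      simp [lvuLoopA, hr, List.findIdx?_cons, lvuP]
    · have hn : pvRepl c = none := by
        cases hh : pvRepl c
        · rfl
        · exact absurd (by simp [lvuP, hh]) h
      simp only [lvuLoopA, hn, List.findIdx?_cons, lvuP]
      simp only [lvuP] at h
      simp only [hn, Option.isSome_none, Bool.false_eq_true, if_false, ih]
      cases hk : rest.findIdx? lvuP with
      | none => simp
      | some k =>
        simp only [Option.map_some, Option.bind_some, List.getElem?_cons_succ]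
        have : idx + 1 + k = idx + (k + 1) := by omega
        rw [this]

-- the comprehension on l ++ [c]
theorem lvuPositions_append (c : Char) :
    ∀ (l : List Char) (i : Nat),
      lvuPositions i (l ++ [c]) =
        lvuPositions i l ++ (if lvuP c then [i + l.length] else []) := by
  intro l
  induction l with
  | nil => intro i; by_cases h : lvuP c <;> simp [lvuPositions, lvuP] at * <;> simp [h]
  | cons d rest ih =>
    intro i
    by_cases h : lvuP d <;>
      simp [lvuPositions, lvuP] at h ⊢ <;>
      simp [h, ih, lvuP, Nat.add_comm, Nat.add_assoc, Nat.add_left_comm]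

-- last collected position = first vowel of the reverse, re-indexed
theorem lvuPositions_getLast? (l : List Char) :
    ∀ (i : Nat),
      (lvuPositions i l).getLast? =
        (l.reverse.findIdx? lvuP).map (fun k => i + l.length - 1 - k) := by
  induction l using List.reverseRecOn with
  | nil => intro i; simp [lvuPositions]
  | append_singleton rest c ih =>
    intro i
    rw [lvuPositions_append]
    by_cases h : lvuP c
    · simp [h, List.findIdx?_cons]
    · rw [if_neg h, List.append_nil, ih i]
      rw [show (rest ++ [c]).reverse = c :: rest.reverse by simp]
      rw [List.findIdx?_cons, if_neg h]
      cases hk : rest.reverse.findIdx? lvuP with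
      | none => simp
      | some k =>
        simp only [Option.map_some, List.length_append, List.length_singleton]
        congr 1
        omega

-- a successful findIdx? yields an element at that index satisfying the predicate
theorem findIdx?_getElem? {p : Char → Bool} :
    ∀ (t : List Char) (k : Nat), t.findIdx? p = some k → ∃ c, t[k]? = some c ∧ p c = true := by
  intro t
  induction t with
  | nil => intro k h; simp [List.findIdx?_nil] at h
  | cons c rest ih =>
    intro k h
    rw [List.findIdx?_cons] at h
    by_cases hp : p c
    · simp [hp] at h; subst h; exact ⟨c, by simp, hp⟩
    · simp [hp] at h
      rcases h with ⟨k', hk', rfl⟩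
      rcases ih k' hk' with ⟨d, hd, hpd⟩
      exact ⟨d, by simpa using hd, hpd⟩

-- Pre_ means the loop predicate holds somewhere
theorem pre_iff_any (str : String) :
    Pre_last_vowel_to_umlauts str → (str.toList.any lvuP) = true := by
  intro h
  unfold Pre_last_vowel_to_umlauts at h
  rw [List.any_eq_true] at h ⊢
  rcases h with ⟨c, hc, hm⟩
  refine ⟨c, hc, ?_⟩
  simp only [List.mem_cons, List.mem_singleton, decide_eq_true_eq] at hm
  rcases hm with rfl | rfl | rfl | rfl | rfl | hm
  · rfl
  · rfl
  · rfl
  · rfl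
  · rfl
  · rcases hm with rfl | h'
    · rfl
    · simp at h'

-- ===== VERDICT (by name: the statement is the Claim_ definition above) =====
theorem last_vowel_to_umlauts_spec : Claim_equal_last_vowel_to_umlauts := by
  intro str _ hpre
  unfold Spec_last_vowel_to_umlauts last_vowel_to_umlauts last_vowel_to_umlauts_alt
  set s := str.toList with hs
  have hany : s.any lvuP = true := pre_iff_any str hpre
  have hanyrev : s.reverse.any lvuP = true := by simpa using hany
  obtain ⟨k, hk⟩ : ∃ k, s.reverse.findIdx? lvuP = some k := by
    cases hfi : s.reverse.findIdx? lvuP with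
    | none =>
      exfalso
      have := List.findIdx?_eq_none_iff.mp hfi
      rw [List.any_eq_true] at hanyrev
      rcases hanyrev with ⟨c, hc, hpc⟩
      have := this c hc
      simp [hpc] at this
    | some k => exact ⟨k, rfl⟩
  rcases findIdx?_getElem? s.reverse k hk with ⟨c, hc, hpc⟩
  have hklt : k < s.length := by
    have := List.getElem?_eq_some_iff.mp hc
    rcases this with ⟨hlt, _⟩
    simpa using hlt
  have hrev : s.reverse[k]? = s[s.length - 1 - k]? := by
    rw [List.getElem?_reverse hklt]
  rw [lvuLoopA_eq, hk, lvuPositions_getLast?, hk]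
  simp only [Option.map_some, Option.bind_some]
  rw [hc]
  have hj : s[s.length - 1 - k]? = some c := by rw [← hrev, hc]
  have h1 : s.length - (1 + k) = 0 + s.length - 1 - k := by omega
  rw [h1]
  simp [hj]
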